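-- pv_equiv track=rewrite | github.com/MichalBravansky/lightweight-shell | src/commands/cut.py | cut_bytes_from_line
-- ===== SOURCE A (Python) =====
-- def cut_bytes_from_line(line, byte_ranges):
--     """
--     Extracts bytes from a line based on the specified byte ranges.
--
--     Args:
--         line (str): The line from which to cut bytes.
--         byte_ranges (list of tuples): Byte ranges to cut from the line.
--
--     Returns:
--         str: The extracted bytes as a single string.
--     """
--     result = []
--     for i in range(len(line)):
--         for start, end in byte_ranges:
--             end = end if end and end <= len(line) else len(line)
--             if start <= i < end:
--                 result.append(line[i])
--                 break
--     return "".join(result)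
-- ===== SOURCE B (Python) =====
-- def cut_bytes_from_line(line, byte_ranges):
--     """O(n+m) re-implementation: difference array over clamped ranges, then one prefix-sum pass."""
--     n = len(line)
--     diff = [0] * (n + 1)
--     for start, end in byte_ranges:
--         e = end if end and end <= n else n
--         lo = min(max(start, 0), n)
--         hi = max(e, lo)
--         diff[lo] += 1
--         diff[hi] -= 1
--     out = []
--     cov = 0
--     for i in range(n):
--         cov += diff[i]
--         if cov > 0:
--             out.append(line[i])
--     return "".join(out)
-- ===== Notes on version B (the rewrite author's own statement) =====
-- stated objective: faster
-- what changed: Replaced the per-character scan over all byte ranges (with its first-match break) by a difference array built with two point updates per clamped range followed by one prefix-sum pass over the line.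
import Mathlib
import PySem

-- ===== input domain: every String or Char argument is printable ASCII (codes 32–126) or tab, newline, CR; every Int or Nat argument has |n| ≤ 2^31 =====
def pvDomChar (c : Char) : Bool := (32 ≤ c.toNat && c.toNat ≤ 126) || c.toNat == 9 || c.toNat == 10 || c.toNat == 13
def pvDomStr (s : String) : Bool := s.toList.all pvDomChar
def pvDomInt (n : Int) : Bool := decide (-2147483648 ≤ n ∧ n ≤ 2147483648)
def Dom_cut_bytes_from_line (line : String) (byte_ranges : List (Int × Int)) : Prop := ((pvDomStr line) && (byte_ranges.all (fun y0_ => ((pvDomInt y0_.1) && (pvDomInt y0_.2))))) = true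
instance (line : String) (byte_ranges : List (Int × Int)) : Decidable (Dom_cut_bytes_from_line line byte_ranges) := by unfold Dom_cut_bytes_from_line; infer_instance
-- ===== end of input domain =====

-- B replaces A's per-character scan over all ranges by a difference array built from the
-- clamped ranges plus one prefix-sum pass; proved equal on all inputs.


-- ===== PORT A =====
-- the inner 'for start, end in byte_ranges' loop with its break: append line[i] at the first matching range
def pvCutA_inner (n i : Int) (c : Char) : List (Int × Int) → List Char → List Char
  | [], acc => acc
  | (s, e) :: rest, acc =>
    let e' := if e ≠ 0 ∧ e ≤ n then e else n   -- end = end if end and end <= len(line) else len(line)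
    if s ≤ i ∧ i < e' then acc ++ [c] else pvCutA_inner n i c rest acc

def cut_bytes_from_line (line : String) (byte_ranges : List (Int × Int)) : String :=
  let cs := line.toList
  let n : Int := PySem.List.len cs
  -- for i in range(len(line)): …  (line[i] is always in range here, so pyGetD is exact)
  let result := (PySem.List.pyRange 0 n 1).foldl
    (fun acc i => pvCutA_inner n i (PySem.List.pyGetD cs i ' ') byte_ranges acc) []
  String.ofList result   -- "".join(result): result holds single characters

-- ===== PORT B =====
-- B's per-range update: diff[lo] += 1; diff[hi] -= 1 with the clamped bounds (both indices lie in [0, n])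
def pvStep (n : Int) (d : List Int) (r : Int × Int) : List Int :=
  let e := if r.2 ≠ 0 ∧ r.2 ≤ n then r.2 else n
  let lo := min (max r.1 0) n
  let hi := max e lo
  (d.modify lo.toNat (· + 1)).modify hi.toNat (· - 1)

def cut_bytes_from_line_alt (line : String) (byte_ranges : List (Int × Int)) : String :=
  let cs := line.toList
  let n : Int := PySem.List.len cs
  -- diff = [0] * (n + 1); two point updates per range
  let diff := byte_ranges.foldl (pvStep n) (List.replicate (cs.length + 1) (0 : Int))
  -- cov = 0; for i in range(n): cov += diff[i]; if cov > 0: out.append(line[i])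
  let fin := (PySem.List.pyRange 0 n 1).foldl
    (fun (st : Int × List Char) i =>
      let cov := st.1 + PySem.List.pyGetD diff i 0
      (cov, if 0 < cov then st.2 ++ [PySem.List.pyGetD cs i ' '] else st.2))
    ((0 : Int), ([] : List Char))
  String.ofList fin.2   -- "".join(out)

-- ===== PRECONDITION & SPEC =====
def Spec_cut_bytes_from_line (line : String) (byte_ranges : List (Int × Int)) (out : String) : Prop := out = cut_bytes_from_line_alt line byte_ranges
instance (line : String) (byte_ranges : List (Int × Int)) (out : String) : Decidable (Spec_cut_bytes_from_line line byte_ranges out) := by unfold Spec_cut_bytes_from_line; infer_instance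

-- ===== CLAIM (what is proved, stated in full; the proofs are below) =====
def Claim_equal_cut_bytes_from_line : Prop := ∀ (line : String) (byte_ranges : List (Int × Int)), Dom_cut_bytes_from_line line byte_ranges → Spec_cut_bytes_from_line line byte_ranges (cut_bytes_from_line line byte_ranges)

-- ===== LEMMAS AND PROOFS =====

-- effective end of a range, and "range r covers index i"
def pvEff (n e : Int) : Int := if e ≠ 0 ∧ e ≤ n then e else n
def pvCov (n : Int) (r : Int × Int) (i : Int) : Bool := decide (r.1 ≤ i ∧ i < pvEff n r.2)

theorem pvCutA_inner_eq (n i : Int) (c : Char) (rs : List (Int × Int)) (acc : List Char) :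
    pvCutA_inner n i c rs acc = if rs.any (fun r => pvCov n r i) then acc ++ [c] else acc := by
  induction rs with
  | nil => simp [pvCutA_inner]
  | cons r rest ih =>
    obtain ⟨s, e⟩ := r
    rw [show pvCutA_inner n i c ((s, e) :: rest) acc
          = (if s ≤ i ∧ i < (if e ≠ 0 ∧ e ≤ n then e else n) then acc ++ [c]
             else pvCutA_inner n i c rest acc) from rfl, ih, List.any_cons]
    have hc : pvCov n (s, e) i = decide (s ≤ i ∧ i < (if e ≠ 0 ∧ e ≤ n then e else n)) := rfl
    by_cases h : s ≤ i ∧ i < (if e ≠ 0 ∧ e ≤ n then e else n)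
    · rw [if_pos h, hc, decide_eq_true h, Bool.true_or, if_pos rfl]
    · rw [if_neg h, hc, decide_eq_false h, Bool.false_or]

-- A in closed form: the characters whose index some range covers
theorem cutA_closed (line : String) (rs : List (Int × Int)) :
    cut_bytes_from_line line rs =
      String.ofList (((List.range line.toList.length).filter
        (fun (k : Nat) => rs.any (fun r => pvCov (line.toList.length : Int) r (k : Int)))).map
        (fun (k : Nat) => line.toList.getD k ' ')) := by
  simp only [cut_bytes_from_line, PySem.List.len_eq]
  rw [PySem.List.pyRange_zero_natCast, List.foldl_map]
  simp only [pvCutA_inner_eq, PySem.List.pyGetD_natCast]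
  rw [PySem.List.foldl_append_if
    (fun (k : Nat) => rs.any (fun r => pvCov (line.toList.length : Int) r (k : Int)))
    (fun (k : Nat) => line.toList.getD k ' ') (List.range line.toList.length) []]
  simp

-- sum of a prefix after a single point update
theorem sum_take_modify (l : List Int) (j k : Nat) (c : Int) (f : Int → Int)
    (hf : ∀ x, f x = x + c) (hj : j < l.length) :
    ((l.modify j f).take k).sum = (l.take k).sum + if j < k then c else 0 := by
  rw [List.take_modify]
  set t := l.take k with ht
  by_cases h : j < k
  · have hjt : j < t.length := by rw [ht, List.length_take]; omega
    rw [List.modify_eq_set_get f hjt, List.sum_set]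
    have hsplit : t.sum = (t.take j).sum + (t.drop j).sum := by
      rw [← List.sum_append, List.take_append_drop]
    rw [List.drop_eq_getElem_cons hjt] at hsplit
    simp only [List.sum_cons] at hsplit
    rw [if_pos hjt, if_pos h, List.get_eq_getElem, hf]
    have hx : t[(⟨j, hjt⟩ : Fin t.length).val] = t[j] := rfl
    rw [hx]
    omega
  · have hjt : t.length ≤ j := by rw [ht, List.length_take]; omega
    rw [List.modify_eq_self hjt]
    simp [h]

theorem length_pvStep (n : Int) (d : List Int) (r : Int × Int) :
    (pvStep n d r).length = d.length := by
  simp [pvStep]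

-- one update changes the prefix sum at i by exactly "r covers i"
theorem sum_take_pvStep (L : Nat) (d : List Int) (hd : d.length = L + 1) (r : Int × Int)
    (i : Nat) (hi : i < L) :
    ((pvStep (L : Int) d r).take (i+1)).sum
      = (d.take (i+1)).sum + (if pvCov (L : Int) r (i : Int) then 1 else 0) := by
  obtain ⟨s, e⟩ := r
  simp only [pvStep]
  set n : Int := (L : Int) with hn
  set e' := if e ≠ 0 ∧ e ≤ n then e else n with he'
  set lo := min (max s 0) n with hlo
  set hi' := max e' lo with hhi
  have he'le : e' ≤ n := by rw [he']; split <;> omega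
  have hlo0 : 0 ≤ lo ∧ lo ≤ n := by constructor <;> omega
  have hhib : 0 ≤ hi' ∧ hi' ≤ n := by constructor <;> omega
  have h1 : lo.toNat < d.length := by rw [hd]; omega
  have h2 : hi'.toNat < (d.modify lo.toNat (· + 1)).length := by
    rw [List.length_modify, hd]; omega
  rw [sum_take_modify _ hi'.toNat (i+1) (-1) (· - 1) (fun x => by ring) h2,
      sum_take_modify d lo.toNat (i+1) 1 (· + 1) (fun x => by ring) h1]
  have hcov : pvCov n (s, e) (i : Int) = decide (lo.toNat < i + 1 ∧ ¬ hi'.toNat < i + 1) := by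
    simp only [pvCov, pvEff, ← he', decide_eq_decide]
    constructor
    · intro hc; omega
    · intro hc; omega
  rw [hcov]
  by_cases ha : lo.toNat < i + 1 <;> by_cases hb : hi'.toNat < i + 1 <;>
    simp [ha, hb] <;> omega

theorem length_foldl_pvStep (n : Int) (rs : List (Int × Int)) (d : List Int) :
    (rs.foldl (pvStep n) d).length = d.length := by
  induction rs generalizing d with
  | nil => rfl
  | cons r rest ih => rw [List.foldl_cons, ih, length_pvStep]

-- prefix sums of the finished difference array count the covering ranges
theorem sum_take_foldl_pvStep (L : Nat) (rs : List (Int × Int)) (d : List Int)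
    (hd : d.length = L + 1) (i : Nat) (hi : i < L) :
    ((rs.foldl (pvStep (L : Int)) d).take (i+1)).sum
      = (d.take (i+1)).sum + (rs.countP (fun r => pvCov (L : Int) r (i : Int)) : Int) := by
  induction rs generalizing d with
  | nil => simp
  | cons r rest ih =>
    rw [List.foldl_cons, ih (pvStep (L : Int) d r) (by rw [length_pvStep, hd]),
        sum_take_pvStep L d hd r i hi, List.countP_cons]
    by_cases h : pvCov (L : Int) r (i : Int) <;> simp [h] <;> omega

-- the prefix-sum pass in closed form
theorem cutB_fold (cs : List Char) (d : List Int)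
    (hd : d.length = cs.length + 1) (m : Nat) (hm : m ≤ cs.length) :
    ((PySem.List.pyRange 0 (m : Int) 1).foldl
      (fun (st : Int × List Char) i =>
        (st.1 + PySem.List.pyGetD d i 0,
         if 0 < st.1 + PySem.List.pyGetD d i 0 then st.2 ++ [PySem.List.pyGetD cs i ' ']
         else st.2))
      ((0 : Int), ([] : List Char)))
    = ((d.take m).sum,
       ((List.range m).filter (fun (k : Nat) => decide (0 < (d.take (k+1)).sum))).map
         (fun (k : Nat) => cs.getD k ' ')) := by
  induction m with
  | zero => simp [PySem.List.pyRange_one_eq_nil]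
  | succ m ih =>
    have hcast : ((m + 1 : Nat) : Int) = (m : Int) + 1 := by push_cast; ring
    rw [hcast, PySem.List.pyRange_one_succ_right (by omega : (0 : Int) ≤ (m : Int)),
        List.foldl_append, ih (by omega)]
    have hmd : m < d.length := by omega
    have hsum : (d.take m).sum + PySem.List.pyGetD d (m : Int) 0 = (d.take (m+1)).sum := by
      rw [PySem.List.pyGetD_natCast, List.getD_eq_getElem d 0 hmd, List.sum_take_succ d m hmd]
    simp only [List.foldl_cons, List.foldl_nil, List.range_succ, List.filter_append,
      List.map_append, List.filter_cons, List.filter_nil]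
    rw [hsum]
    by_cases h : 0 < (d.take (m+1)).sum <;>
      simp [h, PySem.List.pyGetD_natCast]

-- ===== VERDICT (by name: the statement is the Claim_ definition above) =====
theorem cut_bytes_from_line_spec : Claim_equal_cut_bytes_from_line := by
  intro line rs _
  unfold Spec_cut_bytes_from_line
  have hdlen : (rs.foldl (pvStep (line.toList.length : Int))
      (List.replicate (line.toList.length + 1) (0 : Int))).length = line.toList.length + 1 := by
    rw [length_foldl_pvStep, List.length_replicate]
  have hB : cut_bytes_from_line_alt line rs =
      String.ofList (((List.range line.toList.length).filter (fun (k : Nat) =>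
        decide (0 < ((rs.foldl (pvStep (line.toList.length : Int))
          (List.replicate (line.toList.length + 1) (0 : Int))).take (k+1)).sum))).map
        (fun (k : Nat) => line.toList.getD k ' ')) := by
    have hfold := cutB_fold line.toList _ hdlen line.toList.length (le_refl _)
    exact congrArg (fun p => String.ofList p.2) hfold
  rw [cutA_closed, hB]
  congr 1
  congr 1
  apply List.filter_congr
  intro k hk
  have hkL : k < line.toList.length := List.mem_range.mp hk
  rw [sum_take_foldl_pvStep line.toList.length rs _ (by simp) k hkL]
  have hrep : ((List.replicate (line.toList.length + 1) (0 : Int)).take (k+1)).sum = 0 := by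
    simp [List.take_replicate]
  rw [hrep, zero_add, Bool.eq_iff_iff, decide_eq_true_iff, Int.natCast_pos,
     List.countP_pos_iff, List.any_eq_true]
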